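-- pv_equiv track=rewrite | github.com/MatejRojec/Uravnotezen-rdece-modri-povezan-podgraf | izpis_grafa.py | generiraj_p_ijv
-- ===== SOURCE A (Python) =====
-- from itertools import combinations
--
-- def generiraj_vzorec(G): # generera vse mozne vzorce glede na stevilo vrstic
--     n = len(G) # st stolcev
--     m = len(G[0]) # st vrstic
--     a = [i for i in range(1, m)]
--     sez = [i+1 for i in range(m)]
--     return sum([list(map(list, combinations(sez, i))) for i in range(len(sez) + 1)], [])[1:]
--
-- def generiraj_p_ijv(G):
--     p = []
--     n = len(G) # st stolpcev
--     m = len(G[0]) # st vrsic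
--     len_v = len(generiraj_vzorec(G))
--     for i in range(n):
--         p.append([])
--         for j in range((2*n*m)+1): #
--             p[i].append([[] for _ in range(len_v)])
--     return(p)
-- ===== SOURCE B (Python) =====
-- def _chunk(xs, size, count):
--     return [xs[i * size:(i + 1) * size] for i in range(count)]
--
-- def generiraj_p_ijv(G):
--     n = len(G)
--     m = len(G[0])
--     cols = 2 * n * m + 1
--     len_v = 2 ** m - 1  # number of non-empty subsets of an m-element set
--     flat = [[] for _ in range(n * cols * len_v)]
--     return _chunk(_chunk(flat, len_v, n * cols), cols, n)
-- ===== Notes on version B (the rewrite author's own statement) =====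
-- stated objective: alternative
-- what changed: Replaces the subset enumeration (used only for its count) by the closed form 2**m-1 and replaces the nested append loops by a flat allocation of all n*(2nm+1)*(2^m-1) empty lists followed by two slicing-based reshape passes.
import Mathlib
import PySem

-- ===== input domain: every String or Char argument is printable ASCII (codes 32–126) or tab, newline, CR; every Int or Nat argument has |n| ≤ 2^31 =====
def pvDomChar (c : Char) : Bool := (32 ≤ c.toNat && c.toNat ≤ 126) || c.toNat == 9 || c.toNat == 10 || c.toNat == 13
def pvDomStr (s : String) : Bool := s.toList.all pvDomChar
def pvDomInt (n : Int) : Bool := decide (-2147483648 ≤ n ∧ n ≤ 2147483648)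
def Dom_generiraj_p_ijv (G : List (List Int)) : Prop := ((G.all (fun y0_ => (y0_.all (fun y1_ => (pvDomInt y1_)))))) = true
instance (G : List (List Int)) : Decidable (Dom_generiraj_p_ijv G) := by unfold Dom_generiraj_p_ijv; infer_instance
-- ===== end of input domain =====

-- B computes the subset count in closed form (2^m - 1) and builds the result by allocating
-- all empty cells flat, then reshaping by slicing, instead of nested append loops (objective: alternative).

-- ===== PORT A =====
-- itertools.combinations(sez, k) in list order, elements as lists
def pvCombos : List Int → Nat → List (List Int)
  | _, 0 => [[]]
  | [], _ + 1 => []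
  | x :: xs, k + 1 => ((pvCombos xs k).map (fun c => x :: c)) ++ pvCombos xs (k + 1)

def generiraj_vzorec (G : List (List Int)) : List (List Int) :=
  let m := ((PySem.List.pyGet? G 0).getD []).length   -- len(G[0]); Pre_ excludes G = [] where Python raises
  -- `a` in the Python source is unused and dropped
  let sez := (List.range m).map (fun i => (i : Int) + 1)
  (((List.range (sez.length + 1)).map (fun i => pvCombos sez i)).flatten).drop 1

def generiraj_p_ijv (G : List (List Int)) : List (List (List (List Int))) :=
  let n := G.length
  let m := ((PySem.List.pyGet? G 0).getD []).length
  let len_v := (generiraj_vzorec G).length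
  (List.range n).foldl
    (fun p _i =>
      p ++ [(List.range (2 * n * m + 1)).foldl
              (fun row _j => row ++ [(List.range len_v).map (fun _ => ([] : List Int))]) []])
    []

-- ===== PORT B =====
-- xs[i*size:(i+1)*size] for 0 ≤ i: Python slice with nonnegative bounds = drop then take (exact here)
def pvChunk {α : Type} (xs : List α) (size count : Nat) : List (List α) :=
  (List.range count).map (fun i => (xs.drop (i * size)).take size)

def generiraj_p_ijv_alt (G : List (List Int)) : List (List (List (List Int))) :=
  let n := G.length
  let m := ((PySem.List.pyGet? G 0).getD []).length
  let cols := 2 * n * m + 1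
  let len_v := 2 ^ m - 1
  let flat : List (List Int) := (List.range (n * cols * len_v)).map (fun _ => [])
  pvChunk (pvChunk flat len_v (n * cols)) cols n

-- ===== PRECONDITION & SPEC =====
-- Pre_ excludes only the empty graph, on which both Pythons raise IndexError at G[0].
def Pre_generiraj_p_ijv (G : List (List Int)) : Prop := G ≠ []
instance (G : List (List Int)) : Decidable (Pre_generiraj_p_ijv G) := by
  unfold Pre_generiraj_p_ijv; infer_instance
def pvWitness_generiraj_p_ijv : List (List Int) := [[0, 1]]
def Spec_generiraj_p_ijv (G : List (List Int)) (out : List (List (List (List Int)))) : Prop := out = generiraj_p_ijv_alt G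
instance (G : List (List Int)) (out : List (List (List (List Int)))) : Decidable (Spec_generiraj_p_ijv G out) := by unfold Spec_generiraj_p_ijv; infer_instance

-- ===== CLAIM (what is proved, stated in full; the proofs are below) =====
def Claim_equal_generiraj_p_ijv : Prop := ∀ (G : List (List Int)), Dom_generiraj_p_ijv G → Pre_generiraj_p_ijv G → Spec_generiraj_p_ijv G (generiraj_p_ijv G)

-- ===== LEMMAS AND PROOFS =====

theorem pvCombos_length (xs : List Int) (k : Nat) :
    (pvCombos xs k).length = xs.length.choose k := by
  induction xs generalizing k with
  | nil => cases k <;> simp [pvCombos]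
  | cons x xs ih =>
    cases k with
    | zero => simp [pvCombos]
    | succ k => simp [pvCombos, ih, Nat.choose_succ_succ]

theorem sum_choose_list (n : Nat) :
    ((List.range (n + 1)).map (fun i => n.choose i)).sum = 2 ^ n := by
  have h : ((List.range (n + 1)).map (fun i => n.choose i)).sum
      = ∑ i ∈ Finset.range (n + 1), n.choose i := by
    exact Nat.add_zero _ |>.symm ▸ rfl
  rw [h, Nat.sum_range_choose]

theorem vzorec_length (G : List (List Int)) :
    (generiraj_vzorec G).length = 2 ^ ((PySem.List.pyGet? G 0).getD []).length - 1 := by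
  unfold generiraj_vzorec
  have hlen : ((List.range ((PySem.List.pyGet? G 0).getD []).length).map
      (fun i => (i : Int) + 1)).length = ((PySem.List.pyGet? G 0).getD []).length := by
    simp
  simp only [List.length_drop, List.length_flatten, List.map_map, Function.comp_def,
    pvCombos_length, hlen, sum_choose_list]

theorem foldl_append_const {α : Type} (c : α) (k : Nat) (init : List α) :
    (List.range k).foldl (fun acc _ => acc ++ [c]) init = init ++ List.replicate k c := by
  induction k generalizing init with
  | zero => simp
  | succ k ih =>
    rw [List.range_succ, List.foldl_append, ih]
    simp [List.replicate_succ']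

theorem pvChunk_replicate {α : Type} (x : α) (a b : Nat) :
    pvChunk (List.replicate (a * b) x) b a = List.replicate a (List.replicate b x) := by
  unfold pvChunk
  apply List.ext_getElem
  · simp
  · intro i hi _
    simp only [List.length_map, List.length_range] at hi
    simp only [List.getElem_map, List.getElem_range]
    rw [List.drop_replicate, List.take_replicate, List.getElem_replicate]
    congr 1
    have : i * b + b ≤ a * b := by
      have : i + 1 ≤ a := hi
      calc i * b + b = (i + 1) * b := by ring
        _ ≤ a * b := Nat.mul_le_mul_right b this
    omega

-- ===== VERDICT (by name: the statement is the Claim_ definition above) =====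
theorem generiraj_p_ijv_spec : Claim_equal_generiraj_p_ijv := by
  intro G _hDom _hPre
  unfold Spec_generiraj_p_ijv generiraj_p_ijv generiraj_p_ijv_alt
  simp only [vzorec_length, foldl_append_const, List.nil_append,
    List.map_const', List.length_range]
  rw [show G.length * (2 * G.length * ((PySem.List.pyGet? G 0).getD []).length + 1)
        * (2 ^ ((PySem.List.pyGet? G 0).getD []).length - 1)
      = (G.length * (2 * G.length * ((PySem.List.pyGet? G 0).getD []).length + 1))
        * (2 ^ ((PySem.List.pyGet? G 0).getD []).length - 1) from by ring,
     pvChunk_replicate, pvChunk_replicate]
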